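-- pv_equiv track=rewrite | github.com/TuanTranCauAm/Game-Checkers | Code/BotvsBot.py | pixelToInt
-- ===== SOURCE A (Python) =====
-- def pixelToInt(x, y): # Chuyển tọa độ dạng pixel sang (x,y) trên bàng cờ trả về tọa độ trên bàn cờ
--     retx = 0
--     retx_tot = 70
--
--     rety = 0
--     rety_tot = 70
--
--     while (x > retx_tot and retx < 7):
--         retx = retx + 1
--         retx_tot = retx_tot + 70
--
--     while (y > rety_tot and rety < 7):
--         rety = rety + 1
--         rety_tot = rety_tot + 70
--
--     return (retx, rety)
-- ===== SOURCE B (Python) =====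
-- def pixelToInt(x, y):
--     # Closed form: cell index is (coord-1)//70 clamped into [0, 7]; no loops.
--     return (min(7, max(0, (x - 1) // 70)), min(7, max(0, (y - 1) // 70)))
-- ===== Notes on version B (the rewrite author's own statement) =====
-- stated objective: simpler
-- what changed: Replaced the two counting while-loops with a single closed-form clamped floor division min(7, max(0, (coord-1)//70)) per axis.
import Mathlib
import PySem

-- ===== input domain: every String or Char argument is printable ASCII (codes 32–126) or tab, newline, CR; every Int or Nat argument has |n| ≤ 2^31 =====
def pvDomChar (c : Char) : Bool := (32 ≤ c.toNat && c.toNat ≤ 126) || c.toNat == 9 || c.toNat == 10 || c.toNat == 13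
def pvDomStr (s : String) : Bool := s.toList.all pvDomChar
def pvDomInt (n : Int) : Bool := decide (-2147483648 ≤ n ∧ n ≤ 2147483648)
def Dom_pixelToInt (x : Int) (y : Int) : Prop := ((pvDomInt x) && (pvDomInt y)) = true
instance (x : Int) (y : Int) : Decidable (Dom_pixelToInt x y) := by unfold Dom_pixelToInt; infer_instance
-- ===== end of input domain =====

-- B replaces A's two counting while-loops by one clamped floor division per axis (simpler, loop-free).

-- ===== PORT A =====
-- the while-loop `while v > tot and ret < 7: ret += 1; tot += 70`, returning ret
def pixelToIntLoop (v : Int) (ret : Int) (tot : Int) : Int :=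
  if h : v > tot ∧ ret < 7 then pixelToIntLoop v (ret + 1) (tot + 70) else ret
termination_by (7 - ret).toNat
decreasing_by omega

def pixelToInt (x : Int) (y : Int) : Int × Int :=
  let retx := pixelToIntLoop x 0 70
  let rety := pixelToIntLoop y 0 70
  (retx, rety)

-- ===== PORT B =====
def pixelToInt_alt (x : Int) (y : Int) : Int × Int :=
  (min 7 (max 0 (PySem.Int.floordiv (x - 1) 70)),
   min 7 (max 0 (PySem.Int.floordiv (y - 1) 70)))

-- ===== PRECONDITION & SPEC =====
def Spec_pixelToInt (x : Int) (y : Int) (out : Int × Int) : Prop := out = pixelToInt_alt x y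
instance (x : Int) (y : Int) (out : Int × Int) : Decidable (Spec_pixelToInt x y out) := by unfold Spec_pixelToInt; infer_instance

-- ===== CLAIM (what is proved, stated in full; the proofs are below) =====
def Claim_equal_pixelToInt : Prop := ∀ (x : Int) (y : Int), Dom_pixelToInt x y → Spec_pixelToInt x y (pixelToInt x y)

-- ===== LEMMAS AND PROOFS =====

theorem pixelToIntLoop_eq_clamp_aux (v : Int) :
    ∀ (n : Nat) (ret : Int), (7 - ret).toNat = n → 0 ≤ ret →
      ret ≤ min 7 (max 0 (PySem.Int.floordiv (v - 1) 70)) →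
      pixelToIntLoop v ret (70 * ret + 70) = min 7 (max 0 (PySem.Int.floordiv (v - 1) 70)) := by
  intro n
  induction n with
  | zero =>
    intro ret hn h0 hle
    rw [pixelToIntLoop]
    have : ret = 7 := by omega
    have : ¬ (v > 70 * ret + 70 ∧ ret < 7) := by omega
    simp only [this, dite_false]
    omega
  | succ k ih =>
    intro ret hn h0 hle
    have hq := PySem.Int.floordiv_mul_add_mod (v - 1) 70
    have hm0 : 0 ≤ PySem.Int.mod (v - 1) 70 := by
      have := PySem.Int.mod_eq_emod_of_pos (a := v - 1) (b := 70) (by omega)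
      rw [this]; exact Int.emod_nonneg _ (by omega)
    have hm1 : PySem.Int.mod (v - 1) 70 < 70 := by
      have := PySem.Int.mod_eq_emod_of_pos (a := v - 1) (b := 70) (by omega)
      rw [this]; exact Int.emod_lt_of_pos _ (by omega)
    rw [pixelToIntLoop]
    by_cases h : v > 70 * ret + 70 ∧ ret < 7
    · simp only [h, and_self, dite_true]
      have := ih (ret + 1) (by omega) (by omega) (by omega)
      have harg : 70 * (ret + 1) + 70 = 70 * ret + 70 + 70 := by ring
      rw [harg] at this
      exact this
    · simp only [h, dite_false]
      omega

theorem pixelToIntLoop_eq_clamp (v : Int) :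
    pixelToIntLoop v 0 70 = min 7 (max 0 (PySem.Int.floordiv (v - 1) 70)) := by
  have h := pixelToIntLoop_eq_clamp_aux v (7 - (0 : Int)).toNat 0 rfl (by omega)
  have hq := PySem.Int.floordiv_mul_add_mod (v - 1) 70
  have hm0 : 0 ≤ PySem.Int.mod (v - 1) 70 := by
    have := PySem.Int.mod_eq_emod_of_pos (a := v - 1) (b := 70) (by omega)
    rw [this]; exact Int.emod_nonneg _ (by omega)
  have h2 := h (by omega)
  simpa using h2

-- ===== VERDICT (by name: the statement is the Claim_ definition above) =====
theorem pixelToInt_spec : Claim_equal_pixelToInt := by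
  intro x y _
  unfold Spec_pixelToInt pixelToInt pixelToInt_alt
  simp only [pixelToIntLoop_eq_clamp]
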